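-- pv_equiv track=rewrite | github.com/ElmerDaza/vigilantes_contable_1 | pyt/Cobranza.py | ultima_fecha
-- ===== SOURCE A (Python) =====
-- def ultima_fecha(String_fechas):
--     #contador=len(String_meses)
--     cadena=''
--     for i in String_fechas:
--         if(i!=','):
--             cadena+=i
--         else:
--             cadena=''
--     return cadena
-- ===== SOURCE B (Python) =====
-- def ultima_fecha(String_fechas):
--     tail = []
--     for ch in reversed(String_fechas):
--         if ch == ',':
--             break
--         tail.append(ch)
--     return ''.join(reversed(tail))
-- ===== Notes on version B (the rewrite author's own statement) =====
-- stated objective: alternative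
-- what changed: Replaces A's forward accumulate-and-reset-on-comma loop (which rebuilds the accumulator after every comma) by a single backward scan from the end that stops at the first comma and builds the suffix back-to-front.
import Mathlib
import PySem

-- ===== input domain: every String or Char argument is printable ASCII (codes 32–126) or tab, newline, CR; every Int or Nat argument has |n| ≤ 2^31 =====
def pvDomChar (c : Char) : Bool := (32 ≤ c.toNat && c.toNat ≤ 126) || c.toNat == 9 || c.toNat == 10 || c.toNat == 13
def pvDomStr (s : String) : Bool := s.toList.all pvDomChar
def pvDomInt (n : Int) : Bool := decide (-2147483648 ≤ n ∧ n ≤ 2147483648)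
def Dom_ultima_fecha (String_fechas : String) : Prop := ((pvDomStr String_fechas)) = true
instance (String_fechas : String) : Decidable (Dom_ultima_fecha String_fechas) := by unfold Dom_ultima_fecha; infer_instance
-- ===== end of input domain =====

-- B replaces A's forward accumulate-and-reset loop with a backward scan that stops at the first comma (alternative decomposition, same cost).
-- ===== PORT A =====
def ultima_fecha (String_fechas : String) : String :=
  String.ofList (String_fechas.toList.foldl
    (fun cadena i => if i ≠ ',' then cadena ++ [i] else []) [])

-- ===== PORT B =====
-- backward scan: take characters from the end until the first comma, then reverse
def ultima_fecha_alt (String_fechas : String) : String :=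
  String.ofList ((String_fechas.toList.reverse.takeWhile (fun ch => ch ≠ ',')).reverse)

-- ===== PRECONDITION & SPEC =====
def Spec_ultima_fecha (String_fechas : String) (out : String) : Prop := out = ultima_fecha_alt String_fechas
instance (String_fechas : String) (out : String) : Decidable (Spec_ultima_fecha String_fechas out) := by unfold Spec_ultima_fecha; infer_instance

-- ===== CLAIM (what is proved, stated in full; the proofs are below) =====
def Claim_equal_ultima_fecha : Prop := ∀ (String_fechas : String), Dom_ultima_fecha String_fechas → Spec_ultima_fecha String_fechas (ultima_fecha String_fechas)

-- ===== LEMMAS AND PROOFS =====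

-- the takeWhile predicate in the normalized (simp) form
lemma pv_tw_self (t : List Char) (ht : ',' ∉ t) :
    t.reverse.takeWhile (fun ch => !decide (ch = ',')) = t.reverse :=
  List.takeWhile_eq_self_iff.2 (by
    intro x hx; simp; rintro rfl; exact ht (List.mem_reverse.1 hx))

lemma pv_tw_len (t : List Char) (ht : ',' ∈ t) :
    (t.reverse.takeWhile (fun ch => !decide (ch = ','))).length ≠ t.length := by
  intro hlen
  have heq := (List.takeWhile_prefix (l := t.reverse)
      (p := fun ch => !decide (ch = ','))).eq_of_length (by simpa using hlen)
  have := List.takeWhile_eq_self_iff.1 heq ',' (List.mem_reverse.2 ht)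
  simp at this

lemma pv_fold_char (l acc : List Char) :
    l.foldl (fun cadena i => if i ≠ ',' then cadena ++ [i] else []) acc
      = if ',' ∈ l then (l.reverse.takeWhile (fun ch => !decide (ch = ','))).reverse else acc ++ l := by
  induction l generalizing acc with
  | nil => simp
  | cons c t ih =>
    simp only [List.foldl_cons, List.reverse_cons, List.takeWhile_append, ih]
    by_cases hc : c = ','
    · subst hc
      by_cases ht : (',' : Char) ∈ t
      · simp [ht, pv_tw_len t ht]
      · simp [ht, pv_tw_self t ht]
    · by_cases ht : (',' : Char) ∈ t
      · simp [ht, pv_tw_len t ht]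
      · simp [ht, pv_tw_self t ht, hc, Ne.symm hc]

-- ===== VERDICT =====
theorem ultima_fecha_spec : Claim_equal_ultima_fecha := by
  intro s _
  unfold Spec_ultima_fecha ultima_fecha ultima_fecha_alt
  rw [pv_fold_char]
  by_cases h : (',' : Char) ∈ s.toList
  · simp [h]
  · simp [h, pv_tw_self s.toList h]
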